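-- pv_equiv track=rewrite | github.com/liuguangxi/defi_turing | Codes/dt251.py | backtrack
-- ===== SOURCE A (Python) =====
-- def get_neighbors(r, c):
--     """Returns the coordinates of the 8 neighbors for a cell in a 5x5 grid."""
--     return [(r + dr, c + dc) for dr in [-1, 0, 1] for dc in [-1, 0, 1]
--             if (dr != 0 or dc != 0) and 0 <= r + dr < 5 and 0 <= c + dc < 5]
--
-- def get_candidates(k, grid, pos):
--     """
--     Finds empty cells where the value k can be placed.
--     A number k > 2 must be the sum of two existing neighbors a and b (a+b=k).
--     Since a, b >= 1, it follows that a < k and b < k.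
--     """
--     candidates = set()
--     for a in range(1, (k + 1) // 2):
--         b = k - a
--         if a == b or not pos[a] or not pos[b]:
--             continue
--
--         # Candidate cells for k must be neighbors to both pos(a) and pos(b).
--         neigh_a = set(get_neighbors(*pos[a]))
--         neigh_b = set(get_neighbors(*pos[b]))
--         common_neighbors = neigh_a.intersection(neigh_b)
--
--         for r, c in common_neighbors:
--             if grid[r][c] == 0:
--                 candidates.add((r, c))
--     return candidates
--
-- def backtrack(k, grid, pos):
--     """Backtracking algorithm to fill the grid sequentially from 3 to 25."""
--     if k == 26:
--         return True
--
--     candidates = get_candidates(k, grid, pos)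
--
--     # Check fixed constraints for values 7 (at A2) and 18 (at C3/Center).
--     if k == 7:
--         if (0, 1) in candidates:
--             grid[0][1], pos[7] = 7, (0, 1)
--             if backtrack(k + 1, grid, pos): return True
--             grid[0][1], pos[7] = 0, None
--         return False
--
--     if k == 18:
--         if (2, 2) in candidates:
--             grid[2][2], pos[18] = 18, (2, 2)
--             if backtrack(k + 1, grid, pos): return True
--             grid[2][2], pos[18] = 0, None
--         return False
--
--     # For other values, try all valid candidate cells.
--     for r, c in candidates:
--         # Avoid cells reserved for fixed constraints.
--         if (r, c) == (0, 1) or (r, c) == (2, 2):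
--             continue
--
--         grid[r][c], pos[k] = k, (r, c)
--         if backtrack(k + 1, grid, pos):
--             return True
--         grid[r][c], pos[k] = 0, None
--
--     return False
-- ===== SOURCE B (Python) =====
-- def backtrack(k, grid, pos):
--     """Backtracking fill of the 5x5 sum-grid, cell-centric candidate test.
--
--     Same return value as the original; like the original it mutates grid/pos
--     while searching (and restores them on failure)."""
--     if k == 26:
--         return True
--     if k < 3:
--         # k cannot be the sum of two distinct earlier positive values.
--         return False
--
--     for r in range(5):
--         for c in range(5):
--             # Which cells may even be tried at this k (fixed cells for 7 and 18).
--             if k == 7: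
--                 if (r, c) != (0, 1):
--                     continue
--             elif k == 18:
--                 if (r, c) != (2, 2):
--                     continue
--             elif (r, c) == (0, 1) or (r, c) == (2, 2):
--                 continue
--
--             if grid[r][c] != 0:
--                 continue
--
--             # Values already placed on a cell adjacent to (r, c).
--             adjvals = [a for a in range(1, len(pos))
--                        if pos[a] is not None and _adjacent(pos[a], r, c)]
--             if not any(v != k - v and (k - v) in adjvals for v in adjvals):
--                 continue
--
--             grid[r][c], pos[k] = k, (r, c)
--             if backtrack(k + 1, grid, pos):
--                 return True
--             grid[r][c], pos[k] = 0, None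
--
--     return False
--
--
-- def _adjacent(p, r, c):
--     pr, pc = p
--     return abs(r - pr) <= 1 and abs(c - pc) <= 1 and (r, c) != (pr, pc)
-- ===== Notes on version B (the rewrite author's own statement) =====
-- stated objective: alternative
-- what changed: Candidate detection is inverted from value-pair centric to cell-centric: instead of enumerating pairs a+b=k and intersecting the two neighbor sets of pos[a] and pos[b], B scans the 25 cells once, collects the placed values adjacent to each empty cell and asks whether two distinct ones sum to k, and the fixed-cell constraints for 7 and 18 are folded into that single cell loop instead of two special-cased branches.
-- outside the precondition, e.g. on backtrack(4, [], [None, None]): A returns False, B raises IndexError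
import Mathlib
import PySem

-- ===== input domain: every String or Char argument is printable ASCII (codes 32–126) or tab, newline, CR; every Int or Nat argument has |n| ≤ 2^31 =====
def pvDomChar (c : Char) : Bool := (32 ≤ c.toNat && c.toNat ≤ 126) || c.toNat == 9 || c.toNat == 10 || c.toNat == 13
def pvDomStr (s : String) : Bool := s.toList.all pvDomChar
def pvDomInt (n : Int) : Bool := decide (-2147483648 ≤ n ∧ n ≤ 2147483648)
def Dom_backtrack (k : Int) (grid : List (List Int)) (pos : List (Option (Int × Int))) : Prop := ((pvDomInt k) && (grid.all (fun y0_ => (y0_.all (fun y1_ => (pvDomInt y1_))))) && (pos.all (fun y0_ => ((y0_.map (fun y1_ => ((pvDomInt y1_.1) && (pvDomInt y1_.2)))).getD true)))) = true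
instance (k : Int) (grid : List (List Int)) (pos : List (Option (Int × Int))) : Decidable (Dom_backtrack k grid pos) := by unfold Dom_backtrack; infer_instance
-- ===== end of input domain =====

-- B replaces the value-pair candidate search by a single cell-centric scan that also folds in the
-- fixed-cell constraints for 7 and 18 (objective: alternative decomposition, similar cost).
-- Both Pythons mutate grid/pos during the search (restoring them on failure); the equivalence
-- proved here is about the RETURN value only.

-- ===== PORT A =====
-- shared by both ports: the test 'grid[r][c] == 0' and the functional image of 'grid[r][c] = v'
def pvGridZero (grid : List (List Int)) (r c : Int) : Bool :=
  ((PySem.List.pyGet? grid r).bind (fun row => PySem.List.pyGet? row c)) == some 0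

def pvPlace (grid : List (List Int)) (r c v : Int) : List (List Int) :=
  PySem.List.pySetD grid r (PySem.List.pySetD (PySem.List.pyGetD grid r []) c v)

def getNeighbors (r c : Int) : List (Int × Int) :=
  ([-1, 0, 1] : List Int).flatMap (fun dr =>
    ([-1, 0, 1] : List Int).filterMap (fun dc =>
      if (dr ≠ 0 ∨ dc ≠ 0) ∧ 0 ≤ r + dr ∧ r + dr < 5 ∧ 0 ≤ c + dc ∧ c + dc < 5 then
        some (r + dr, c + dc)
      else none))

def getCandidates (k : Int) (grid : List (List Int)) (pos : List (Option (Int × Int))) :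
    PySem.Set (Int × Int) :=
  (PySem.List.pyRange 1 (PySem.Int.floordiv (k + 1) 2)).foldl (fun cands a =>
    let b := k - a
    if a = b then cands
    else
      match (PySem.List.pyGet? pos a).bind id, (PySem.List.pyGet? pos b).bind id with
      | some pa, some pb =>
        let common := PySem.Set.inter (PySem.Set.ofList (getNeighbors pa.1 pa.2))
                                      (PySem.Set.ofList (getNeighbors pb.1 pb.2))
        common.foldl (fun cs rc =>
          if pvGridZero grid rc.1 rc.2 then PySem.Set.add cs rc else cs) cands
      | _, _ => cands) PySem.Set.empty

def backtrackGo : Nat → Int → List (List Int) → List (Option (Int × Int)) → Bool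
  | 0, _, _, _ => false
  | fuel + 1, k, grid, pos =>
    if k = 26 then true
    else
      let cands := getCandidates k grid pos
      if k = 7 then
        PySem.Set.contains cands (0, 1) &&
          backtrackGo fuel (k + 1) (pvPlace grid 0 1 7) (PySem.List.pySetD pos 7 (some (0, 1)))
      else if k = 18 then
        PySem.Set.contains cands (2, 2) &&
          backtrackGo fuel (k + 1) (pvPlace grid 2 2 18) (PySem.List.pySetD pos 18 (some (2, 2)))
      else
        cands.any (fun rc =>
          !(decide (rc = ((0 : Int), (1 : Int))) || decide (rc = ((2 : Int), (2 : Int)))) &&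
            backtrackGo fuel (k + 1) (pvPlace grid rc.1 rc.2 k)
              (PySem.List.pySetD pos k (some rc)))

def backtrack (k : Int) (grid : List (List Int)) (pos : List (Option (Int × Int))) : Bool :=
  backtrackGo (27 - k).toNat k grid pos

-- ===== PORT B =====
def pvAdjacent (p : Int × Int) (r c : Int) : Bool :=
  decide (|r - p.1| ≤ 1 ∧ |c - p.2| ≤ 1 ∧ (r, c) ≠ p)

def pvAdjVals (pos : List (Option (Int × Int))) (r c : Int) : List Int :=
  (PySem.List.pyRange 1 (pos.length : Int)).filter (fun a =>
    match (PySem.List.pyGet? pos a).bind id with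
    | some p => pvAdjacent p r c
    | none => false)

def pvCellOK (k : Int) (grid : List (List Int)) (pos : List (Option (Int × Int)))
    (r c : Int) : Bool :=
  pvGridZero grid r c &&
    (let adjv := pvAdjVals pos r c
     adjv.any (fun v => decide (v ≠ k - v) && adjv.contains (k - v)))

def pvAllowed (k r c : Int) : Bool :=
  if k = 7 then decide ((r, c) = ((0 : Int), (1 : Int)))
  else if k = 18 then decide ((r, c) = ((2 : Int), (2 : Int)))
  else !(decide ((r, c) = ((0 : Int), (1 : Int))) || decide ((r, c) = ((2 : Int), (2 : Int))))

def backtrackAltGo : Nat → Int → List (List Int) → List (Option (Int × Int)) → Bool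
  | 0, _, _, _ => false
  | fuel + 1, k, grid, pos =>
    if k = 26 then true
    else if k < 3 then false
    else
      (PySem.List.pyRange 0 5).any (fun r =>
        (PySem.List.pyRange 0 5).any (fun c =>
          pvAllowed k r c && pvCellOK k grid pos r c &&
            backtrackAltGo fuel (k + 1) (pvPlace grid r c k)
              (PySem.List.pySetD pos k (some (r, c)))))

def backtrack_alt (k : Int) (grid : List (List Int)) (pos : List (Option (Int × Int))) : Bool :=
  backtrackAltGo (27 - k).toNat k grid pos

-- ===== PRECONDITION & SPEC =====
-- Pre_ excludes inputs on which A's pos[...]/grid[...] indexing can raise IndexError: k > 26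
-- (k = 26 returns immediately) and 3 ≤ k ≤ 25 with a grid smaller than 5×5 or pos shorter than 26;
-- on some such inputs A still happens to return False before reaching a bad index (see cites).
def Pre_backtrack (k : Int) (grid : List (List Int)) (pos : List (Option (Int × Int))) : Prop :=
  k ≤ 2 ∨ k = 26 ∨
    (3 ≤ k ∧ k ≤ 25 ∧ 5 ≤ grid.length ∧ (∀ row ∈ grid.take 5, 5 ≤ row.length) ∧
      26 ≤ pos.length)
instance (k : Int) (grid : List (List Int)) (pos : List (Option (Int × Int))) :
    Decidable (Pre_backtrack k grid pos) := by unfold Pre_backtrack; infer_instance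

def pvWitness_backtrack : Int × List (List Int) × (List (Option (Int × Int))) := (26, [], [])

def Spec_backtrack (k : Int) (grid : List (List Int)) (pos : List (Option (Int × Int))) (out : Bool) : Prop := out = backtrack_alt k grid pos
instance (k : Int) (grid : List (List Int)) (pos : List (Option (Int × Int))) (out : Bool) : Decidable (Spec_backtrack k grid pos out) := by unfold Spec_backtrack; infer_instance

-- ===== CLAIM (what is proved, stated in full; the proofs are below) =====
def Claim_equal_backtrack : Prop := ∀ (k : Int) (grid : List (List Int)) (pos : List (Option (Int × Int))), Dom_backtrack k grid pos → Pre_backtrack k grid pos → Spec_backtrack k grid pos (backtrack k grid pos)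

-- ===== LEMMAS AND PROOFS =====

-- condition under which iteration a of A's get_candidates loop contributes the cell rc
def condA (k : Int) (grid : List (List Int)) (pos : List (Option (Int × Int)))
    (a : Int) (rc : Int × Int) : Prop :=
  a ≠ k - a ∧
    ∃ pa pb, (PySem.List.pyGet? pos a).bind id = some pa ∧
      (PySem.List.pyGet? pos (k - a)).bind id = some pb ∧
      rc ∈ getNeighbors pa.1 pa.2 ∧ rc ∈ getNeighbors pb.1 pb.2 ∧
      pvGridZero grid rc.1 rc.2 = true

lemma mem_foldl_inner (grid : List (List Int)) (l : List (Int × Int))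
    (init : PySem.Set (Int × Int)) (rc : Int × Int) :
    rc ∈ l.foldl (fun cs x => if pvGridZero grid x.1 x.2 then PySem.Set.add cs x else cs) init ↔
      rc ∈ init ∨ (rc ∈ l ∧ pvGridZero grid rc.1 rc.2 = true) := by
  induction l generalizing init with
  | nil => simp
  | cons x xs ih =>
    simp only [List.foldl_cons, ih]
    by_cases hx : pvGridZero grid x.1 x.2 = true
    · simp [hx, PySem.Set.mem_add]
      constructor
      · rintro (⟨h | h⟩ | h)
        · exact Or.inl h
        · subst h; exact Or.inr ⟨Or.inl rfl, hx⟩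
        · exact Or.inr ⟨Or.inr h.1, h.2⟩
      · rintro (h | ⟨(h | h), hz⟩)
        · exact Or.inl (Or.inl h)
        · subst h; exact Or.inl (Or.inr rfl)
        · exact Or.inr ⟨h, hz⟩
    · simp [hx]
      constructor
      · rintro (h | h)
        · exact Or.inl h
        · exact Or.inr ⟨Or.inr h.1, h.2⟩
      · rintro (h | ⟨(h | h), hz⟩)
        · exact Or.inl h
        · subst h; exact absurd hz hx
        · exact Or.inr ⟨h, hz⟩


lemma mem_getCandidates (k : Int) (grid : List (List Int)) (pos : List (Option (Int × Int)))
    (rc : Int × Int) :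
    rc ∈ getCandidates k grid pos ↔
      ∃ a, (1 ≤ a ∧ a < PySem.Int.floordiv (k + 1) 2) ∧ condA k grid pos a rc := by
  have aux : ∀ (l : List Int) (init : PySem.Set (Int × Int)),
      rc ∈ l.foldl (fun cands a =>
        let b := k - a
        if a = b then cands
        else
          match (PySem.List.pyGet? pos a).bind id, (PySem.List.pyGet? pos b).bind id with
          | some pa, some pb =>
            let common := PySem.Set.inter (PySem.Set.ofList (getNeighbors pa.1 pa.2))
                                          (PySem.Set.ofList (getNeighbors pb.1 pb.2))
            common.foldl (fun cs rc =>
              if pvGridZero grid rc.1 rc.2 then PySem.Set.add cs rc else cs) cands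
          | _, _ => cands) init ↔
        rc ∈ init ∨ ∃ a ∈ l, condA k grid pos a rc := by
    intro l
    induction l with
    | nil => simp
    | cons a as ih =>
      intro init
      simp only [List.foldl_cons, ih, List.mem_cons]
      by_cases hab : a = k - a
      · simp only [if_pos hab]
        constructor
        · rintro (h | ⟨x, hx, hc⟩)
          · exact Or.inl h
          · exact Or.inr ⟨x, Or.inr hx, hc⟩
        · rintro (h | ⟨x, (hx | hx), hc⟩)
          · exact Or.inl h
          · subst hx; exact absurd hab hc.1
          · exact Or.inr ⟨x, hx, hc⟩
      · simp only [if_neg hab]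
        rcases hpa : (PySem.List.pyGet? pos a).bind id with _ | pa
        · constructor
          · rintro (h | ⟨x, hx, hc⟩)
            · exact Or.inl h
            · exact Or.inr ⟨x, Or.inr hx, hc⟩
          · rintro (h | ⟨x, (hx | hx), hc⟩)
            · exact Or.inl h
            · subst hx; obtain ⟨_, p1, p2, hp1, _⟩ := hc; rw [hpa] at hp1; cases hp1
            · exact Or.inr ⟨x, hx, hc⟩
        · rcases hpb : (PySem.List.pyGet? pos (k - a)).bind id with _ | pb
          · constructor
            · rintro (h | ⟨x, hx, hc⟩)
              · exact Or.inl h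
              · exact Or.inr ⟨x, Or.inr hx, hc⟩
            · rintro (h | ⟨x, (hx | hx), hc⟩)
              · exact Or.inl h
              · subst hx; obtain ⟨_, p1, p2, hp1, hp2, _⟩ := hc; rw [hpb] at hp2; cases hp2
              · exact Or.inr ⟨x, hx, hc⟩
          · simp only [mem_foldl_inner, PySem.Set.mem_inter, PySem.Set.mem_ofList]
            constructor
            · rintro ((h | ⟨⟨hna, hnb⟩, hz⟩) | ⟨x, hx, hc⟩)
              · exact Or.inl h
              · exact Or.inr ⟨a, Or.inl rfl, hab, pa, pb, hpa, hpb, hna, hnb, hz⟩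
              · exact Or.inr ⟨x, Or.inr hx, hc⟩
            · rintro (h | ⟨x, (hx | hx), hc⟩)
              · exact Or.inl (Or.inl h)
              · subst hx
                obtain ⟨hne, p1, p2, hp1, hp2, hn1, hn2, hz⟩ := hc
                rw [hpa] at hp1; rw [hpb] at hp2
                injection hp1 with h1e; injection hp2 with h2e
                subst h1e; subst h2e
                exact Or.inl (Or.inr ⟨⟨hn1, hn2⟩, hz⟩)
              · exact Or.inr ⟨x, hx, hc⟩
  unfold getCandidates
  rw [aux]
  simp only [PySem.Set.empty, List.not_mem_nil, false_or]
  constructor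
  · rintro ⟨a, ha, hc⟩
    exact ⟨a, PySem.List.mem_pyRange_one.mp ha, hc⟩
  · rintro ⟨a, ha, hc⟩
    exact ⟨a, PySem.List.mem_pyRange_one.mpr ha, hc⟩

lemma mem_getNeighbors (pr pc x y : Int) :
    (x, y) ∈ getNeighbors pr pc ↔
      (pvAdjacent (pr, pc) x y = true ∧ 0 ≤ x ∧ x < 5 ∧ 0 ≤ y ∧ y < 5) := by
  simp only [getNeighbors, List.mem_flatMap, List.mem_filterMap, pvAdjacent, decide_eq_true_eq,
    abs_le, ne_eq, Prod.mk.injEq, not_and]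
  constructor
  · rintro ⟨dr, hdr, dc, hdc, h⟩
    split at h
    · rename_i hcond
      obtain ⟨h1, h2, h3, h4, h5⟩ := hcond
      injection h with h; injection h with ha hb
      subst ha; subst hb
      simp only [List.mem_cons, List.not_mem_nil, or_false] at hdr hdc
      refine ⟨⟨by omega, by omega, ?_⟩, by omega, by omega, by omega, by omega⟩
      intro hx hy
      rcases h1 with h1 | h1 <;> omega
    · simp at h
  · rintro ⟨⟨h1, h2, hne⟩, hx0, hx5, hy0, hy5⟩
    refine ⟨x - pr, ?_, y - pc, ?_, ?_⟩
    · simp only [List.mem_cons, List.not_mem_nil, or_false]; omega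
    · simp only [List.mem_cons, List.not_mem_nil, or_false]; omega
    · have hcond : (x - pr ≠ 0 ∨ y - pc ≠ 0) ∧ 0 ≤ pr + (x - pr) ∧ pr + (x - pr) < 5 ∧
          0 ≤ pc + (y - pc) ∧ pc + (y - pc) < 5 := by
        constructor
        · by_cases hxe : x = pr
          · right; intro hyc; exact hne (by omega) (by omega)
          · left; omega
        · omega
      rw [if_pos hcond]
      simp only [Option.some.injEq, Prod.mk.injEq]
      omega

lemma mem_adjVals (pos : List (Option (Int × Int))) (r c a : Int) :
    a ∈ pvAdjVals pos r c ↔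
      (1 ≤ a ∧ a < (pos.length : Int)) ∧
        ∃ p, (PySem.List.pyGet? pos a).bind id = some p ∧ pvAdjacent p r c = true := by
  simp only [pvAdjVals, List.mem_filter, PySem.List.mem_pyRange_one]
  refine and_congr_right fun _ => ?_
  rcases h : (PySem.List.pyGet? pos a).bind id with _ | p
  · simp
  · simp only [Option.some.injEq]
    constructor
    · intro ha; exact ⟨p, rfl, ha⟩
    · rintro ⟨p1, rfl, ha⟩; exact ha

lemma cellOK_iff (k : Int) (grid : List (List Int)) (pos : List (Option (Int × Int))) (r c : Int) :
    pvCellOK k grid pos r c = true ↔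
      pvGridZero grid r c = true ∧
        ∃ v, v ∈ pvAdjVals pos r c ∧ v ≠ k - v ∧ (k - v) ∈ pvAdjVals pos r c := by
  simp only [pvCellOK, Bool.and_eq_true, List.any_eq_true, decide_eq_true_eq,
    List.contains_iff_mem]

-- the central semantic bridge: A's candidate set = B's per-cell test, on in-bounds cells
lemma cands_iff_cellOK (k : Int) (grid : List (List Int)) (pos : List (Option (Int × Int)))
    (h3 : 3 ≤ k) (h25 : k ≤ 25) (hp : 26 ≤ pos.length) (r c : Int)
    (hr0 : 0 ≤ r) (hr5 : r < 5) (hc0 : 0 ≤ c) (hc5 : c < 5) :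
    (r, c) ∈ getCandidates k grid pos ↔ pvCellOK k grid pos r c = true := by
  have hfd : PySem.Int.floordiv (k + 1) 2 = (k + 1) / 2 :=
    PySem.Int.floordiv_eq_ediv_of_pos (by norm_num)
  rw [mem_getCandidates, cellOK_iff]
  constructor
  · rintro ⟨a, ⟨ha1, ha2⟩, hne, pa, pb, hpa, hpb, hna, hnb, hz⟩
    obtain ⟨pa1, pa2⟩ := pa
    obtain ⟨pb1, pb2⟩ := pb
    rw [hfd] at ha2
    obtain ⟨hadja, _⟩ := (mem_getNeighbors pa1 pa2 r c).mp hna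
    obtain ⟨hadjb, _⟩ := (mem_getNeighbors pb1 pb2 r c).mp hnb
    refine ⟨hz, a, ?_, hne, ?_⟩
    · exact (mem_adjVals pos r c a).mpr ⟨⟨ha1, by omega⟩, (pa1, pa2), hpa, hadja⟩
    · exact (mem_adjVals pos r c (k - a)).mpr ⟨⟨by omega, by omega⟩, (pb1, pb2), hpb, hadjb⟩
  · rintro ⟨hz, v, hv, hne, hkv⟩
    obtain ⟨⟨hv1, hvlen⟩, p, hp?, hadjp⟩ := (mem_adjVals pos r c v).mp hv
    obtain ⟨⟨hw1, hwlen⟩, q, hq?, hadjq⟩ := (mem_adjVals pos r c (k - v)).mp hkv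
    obtain ⟨p1, p2⟩ := p
    obtain ⟨q1, q2⟩ := q
    have hnp : (r, c) ∈ getNeighbors p1 p2 :=
      (mem_getNeighbors p1 p2 r c).mpr ⟨hadjp, hr0, hr5, hc0, hc5⟩
    have hnq : (r, c) ∈ getNeighbors q1 q2 :=
      (mem_getNeighbors q1 q2 r c).mpr ⟨hadjq, hr0, hr5, hc0, hc5⟩
    by_cases hvw : v < k - v
    · refine ⟨v, ⟨hv1, by rw [hfd]; omega⟩, by omega, (p1, p2), (q1, q2), hp?, hq?, hnp, hnq, hz⟩
    · have hvv : k - (k - v) = v := by ring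
      refine ⟨k - v, ⟨hw1, by rw [hfd]; omega⟩, by omega, (q1, q2), (p1, p2), hq?, ?_, hnq, hnp, hz⟩
      rw [hvv]
      exact hp?

lemma cands_bounds (k : Int) (grid : List (List Int)) (pos : List (Option (Int × Int)))
    (rc : Int × Int) (h : rc ∈ getCandidates k grid pos) :
    0 ≤ rc.1 ∧ rc.1 < 5 ∧ 0 ≤ rc.2 ∧ rc.2 < 5 := by
  obtain ⟨x, y⟩ := rc
  obtain ⟨a, _, _, pa, pb, _, _, hn, _, _⟩ := (mem_getCandidates k grid pos (x, y)).mp h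
  obtain ⟨_, hb⟩ := (mem_getNeighbors pa.1 pa.2 x y).mp hn
  exact ⟨hb.1, hb.2.1, hb.2.2.1, hb.2.2.2⟩

lemma pre_place (k : Int) (grid : List (List Int)) (pos : List (Option (Int × Int)))
    (h3 : 3 ≤ k) (h25 : k ≤ 25) (hg : 5 ≤ grid.length)
    (hrows : ∀ row ∈ grid.take 5, 5 ≤ row.length) (hp : 26 ≤ pos.length)
    (r c : Int) (hr0 : 0 ≤ r) (hr5 : r < 5) (v : Int) (w : Option (Int × Int)) :
    Pre_backtrack (k + 1) (pvPlace grid r c v) (PySem.List.pySetD pos k w) := by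
  by_cases h26 : k = 25
  · right; left; omega
  right; right
  refine ⟨by omega, by omega, ?_, ?_, ?_⟩
  · rw [pvPlace, PySem.List.length_pySetD]; exact hg
  · intro row hrow
    rw [pvPlace, PySem.List.pySetD_of_nonneg _ _ hr0] at hrow
    rw [List.mem_iff_getElem] at hrow
    obtain ⟨j, hj, hje⟩ := hrow
    have hj5 : j < 5 := by
      have := hj; simp only [List.length_take, List.length_set] at this; omega
    rw [List.getElem_take, List.getElem_set] at hje
    by_cases hjr : r.toNat = j
    · rw [if_pos hjr] at hje
      subst hje
      rw [PySem.List.length_pySetD]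
      rw [PySem.List.pyGetD_eq_getElem _ _ hr0 (by omega)]
      apply hrows
      rw [List.mem_iff_getElem]
      exact ⟨r.toNat, by simp [List.length_take]; omega, List.getElem_take⟩
    · rw [if_neg hjr] at hje
      subst hje
      apply hrows
      rw [List.mem_iff_getElem]
      exact ⟨j, by simp [List.length_take]; omega, List.getElem_take⟩
  · rw [PySem.List.length_pySetD]; exact hp

lemma go_eq (fuel : Nat) : ∀ (k : Int) (grid : List (List Int)) (pos : List (Option (Int × Int))),
    Pre_backtrack k grid pos →
    backtrackGo fuel k grid pos = backtrackAltGo fuel k grid pos := by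
  induction fuel with
  | zero => intro k grid pos _; rfl
  | succ n ih =>
    intro k grid pos hpre
    by_cases h26 : k = 26
    · subst h26; simp [backtrackGo, backtrackAltGo]
    · rcases hpre with hk2 | h26' | ⟨h3, h25, hg, hrows, hp⟩
      · have h7 : ¬ k = 7 := by omega
        have h18 : ¬ k = 18 := by omega
        have h3' : k < 3 := by omega
        simp only [backtrackGo, backtrackAltGo, if_neg h26, if_neg h7, if_neg h18, if_pos h3']
        apply List.any_eq_false.mpr
        intro rc hrc _
        obtain ⟨a, ⟨ha1, ha2⟩, _⟩ := (mem_getCandidates k grid pos rc).mp hrc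
        rw [PySem.Int.floordiv_eq_ediv_of_pos (by norm_num)] at ha2
        omega
      · exact absurd h26' h26
      · have hlt3 : ¬ k < 3 := by omega
        simp only [backtrackGo, backtrackAltGo, if_neg h26, if_neg hlt3]
        by_cases h7 : k = 7
        · rw [if_pos h7]
          subst h7
          have hco := cands_iff_cellOK 7 grid pos (by omega) (by omega) hp 0 1
            (by omega) (by omega) (by omega) (by omega)
          have hrec := ih (7 + 1) (pvPlace grid 0 1 7) (PySem.List.pySetD pos 7 (some (0, 1)))
            (pre_place 7 grid pos (by omega) (by omega) hg hrows hp 0 1 (by omega) (by omega)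
              7 (some (0, 1)))
          rw [Bool.eq_iff_iff, Bool.and_eq_true]
          simp only [List.any_eq_true, PySem.List.mem_pyRange_one, Bool.and_eq_true,
            pvAllowed, reduceIte, decide_eq_true_eq, PySem.Set.contains_iff]
          constructor
          · rintro ⟨hm, hr⟩
            exact ⟨0, ⟨by omega, by omega⟩, 1, ⟨by omega, by omega⟩, ⟨rfl, hco.mp hm⟩,
              by rw [← hrec]; exact hr⟩
          · rintro ⟨r, hr, c, hc, ⟨heq, hok⟩, hrb⟩
            rw [Prod.mk.injEq] at heq
            obtain ⟨rfl, rfl⟩ := heq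
            exact ⟨hco.mpr hok, by rw [hrec]; exact hrb⟩
        · by_cases h18 : k = 18
          · rw [if_neg h7, if_pos h18]
            subst h18
            have hco := cands_iff_cellOK 18 grid pos (by omega) (by omega) hp 2 2
              (by omega) (by omega) (by omega) (by omega)
            have hrec := ih (18 + 1) (pvPlace grid 2 2 18)
              (PySem.List.pySetD pos 18 (some (2, 2)))
              (pre_place 18 grid pos (by omega) (by omega) hg hrows hp 2 2 (by omega) (by omega)
                18 (some (2, 2)))
            rw [Bool.eq_iff_iff, Bool.and_eq_true]
            simp only [List.any_eq_true, PySem.List.mem_pyRange_one, Bool.and_eq_true,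
              pvAllowed, if_neg h7, reduceIte, decide_eq_true_eq, PySem.Set.contains_iff]
            constructor
            · rintro ⟨hm, hr⟩
              exact ⟨2, ⟨by omega, by omega⟩, 2, ⟨by omega, by omega⟩, ⟨rfl, hco.mp hm⟩,
                by rw [← hrec]; exact hr⟩
            · rintro ⟨r, hr, c, hc, ⟨heq, hok⟩, hrb⟩
              rw [Prod.mk.injEq] at heq
              obtain ⟨rfl, rfl⟩ := heq
              exact ⟨hco.mpr hok, by rw [hrec]; exact hrb⟩
          · rw [if_neg h7, if_neg h18]
            rw [Bool.eq_iff_iff]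
            simp only [List.any_eq_true, PySem.List.mem_pyRange_one, Bool.and_eq_true,
              pvAllowed, if_neg h7, if_neg h18, Bool.not_eq_eq_eq_not, Bool.not_true,
              Bool.or_eq_false_iff, decide_eq_false_iff_not]
            constructor
            · rintro ⟨rc, hm, hres, hr⟩
              obtain ⟨x, y⟩ := rc
              obtain ⟨hx0, hx5, hy0, hy5⟩ := cands_bounds k grid pos (x, y) hm
              have hco := cands_iff_cellOK k grid pos h3 h25 hp x y hx0 hx5 hy0 hy5
              have hrec := ih (k + 1) (pvPlace grid x y k) (PySem.List.pySetD pos k (some (x, y)))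
                (pre_place k grid pos h3 h25 hg hrows hp x y hx0 hx5 k (some (x, y)))
              exact ⟨x, ⟨hx0, hx5⟩, y, ⟨hy0, hy5⟩, ⟨hres, hco.mp hm⟩, by rw [← hrec]; exact hr⟩
            · rintro ⟨r, ⟨hr0, hr5⟩, c, ⟨hc0, hc5⟩, ⟨hres, hok⟩, hrb⟩
              have hco := cands_iff_cellOK k grid pos h3 h25 hp r c hr0 hr5 hc0 hc5
              have hrec := ih (k + 1) (pvPlace grid r c k) (PySem.List.pySetD pos k (some (r, c)))
                (pre_place k grid pos h3 h25 hg hrows hp r c hr0 hr5 k (some (r, c)))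
              exact ⟨(r, c), hco.mpr hok, hres, by rw [hrec]; exact hrb⟩

-- ===== VERDICT (by name: the statement is the Claim_ definition above) =====
theorem backtrack_spec : Claim_equal_backtrack := by
  intro k grid pos _ hpre
  unfold Spec_backtrack backtrack backtrack_alt
  exact go_eq _ k grid pos hpre
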